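-- pv_equiv track=rewrite | github.com/morelikeGIFHUB/queens-puzzle-sinner | songqueens.py | _region_bounds
-- ===== SOURCE A (Python) =====
-- from typing import Dict, Set, Tuple, List
--
-- def _region_bounds(regions, N: int) -> Dict[int, tuple[int, int, int, int]]:
--     """Returns rid -> (min_r, max_r, min_c, max_c)."""
--     b: Dict[int, tuple[int, int, int, int]] = {}
--     for r in range(N):
--         for c in range(N):
--             rid = regions[r][c]
--             if rid not in b:
--                 b[rid] = (r, r, c, c)
--             else:
--                 r0, r1, c0, c1 = b[rid]
--                 b[rid] = (min(r0, r), max(r1, r), min(c0, c), max(c1, c))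
--     return b
-- ===== SOURCE B (Python) =====
-- def _region_bounds(regions, N: int):
--     """Returns rid -> (min_r, max_r, min_c, max_c).
--
--     Two passes: first group row/column coordinates per region id (keys in
--     first-appearance order), then reduce each group with min/max.
--     """
--     g = {}
--     for r in range(N):
--         for c in range(N):
--             rid = regions[r][c]
--             if rid in g:
--                 rs, cs = g[rid]
--                 rs.append(r)
--                 cs.append(c)
--             else:
--                 g[rid] = ([r], [c])
--     return {rid: (min(rs), max(rs), min(cs), max(cs)) for rid, (rs, cs) in g.items()}
-- ===== Notes on version B (the rewrite author's own statement) =====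
-- stated objective: alternative
-- what changed: B groups all cell coordinates per region id in one scan and computes each bounding box afterwards with min/max over the collected rows/columns, instead of A's running per-cell min/max update of the box tuple.
import Mathlib
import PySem

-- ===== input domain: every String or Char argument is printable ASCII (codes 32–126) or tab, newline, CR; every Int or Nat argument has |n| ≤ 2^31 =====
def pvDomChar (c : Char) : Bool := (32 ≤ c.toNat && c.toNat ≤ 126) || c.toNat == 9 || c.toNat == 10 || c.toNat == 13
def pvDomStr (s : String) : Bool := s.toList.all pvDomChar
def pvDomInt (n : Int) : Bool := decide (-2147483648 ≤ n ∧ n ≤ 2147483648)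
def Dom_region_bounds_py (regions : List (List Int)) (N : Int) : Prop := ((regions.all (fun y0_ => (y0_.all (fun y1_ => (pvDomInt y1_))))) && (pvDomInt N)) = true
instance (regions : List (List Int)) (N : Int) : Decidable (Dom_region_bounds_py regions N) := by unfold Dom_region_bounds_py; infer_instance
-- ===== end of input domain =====

-- B groups all cell coordinates per region id in one scan and reduces each group with min/max
-- afterwards, instead of A's running per-cell min/max update (objective: alternative decomposition).

-- ===== PORT A =====
def region_bounds_py (regions : List (List Int)) (N : Int) : List (Int × Int × Int × Int × Int) :=
  let b : PySem.Dict Int (Int × Int × Int × Int) :=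
    (PySem.List.pyRange 0 N 1).foldl (fun b r =>
      (PySem.List.pyRange 0 N 1).foldl (fun b c =>
        let rid := PySem.List.pyGetD (PySem.List.pyGetD regions r []) c 0
        match b.get? rid with
        | none => b.insert rid (r, r, c, c)
        | some (r0, r1, c0, c1) =>
            b.insert rid (min r0 r, max r1 r, min c0 c, max c1 c)) b) PySem.Dict.empty
  b.items

-- ===== PORT B =====
def region_bounds_py_alt (regions : List (List Int)) (N : Int) : List (Int × Int × Int × Int × Int) :=
  let g : PySem.Dict Int (List Int × List Int) :=
    (PySem.List.pyRange 0 N 1).foldl (fun g r =>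
      (PySem.List.pyRange 0 N 1).foldl (fun g c =>
        let rid := PySem.List.pyGetD (PySem.List.pyGetD regions r []) c 0
        match g.get? rid with
        | none => g.insert rid ([r], [c])
        | some (rs, cs) => g.insert rid (rs ++ [r], cs ++ [c])) g) PySem.Dict.empty
  g.items.map (fun p =>
    (p.1, (PySem.List.min? p.2.1 (fun y => y)).getD 0,
          (PySem.List.max? p.2.1 (fun y => y)).getD 0,
          (PySem.List.min? p.2.2 (fun y => y)).getD 0,
          (PySem.List.max? p.2.2 (fun y => y)).getD 0))

-- ===== PRECONDITION & SPEC =====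
-- Pre_ excludes exactly the inputs where A raises IndexError: fewer than N rows, or a row
-- among the first N shorter than N.
def Pre_region_bounds_py (regions : List (List Int)) (N : Int) : Prop :=
  N.toNat ≤ regions.length ∧ ∀ row ∈ regions.take N.toNat, N.toNat ≤ row.length
instance (regions : List (List Int)) (N : Int) : Decidable (Pre_region_bounds_py regions N) := by unfold Pre_region_bounds_py; infer_instance
def pvWitness_region_bounds_py : List (List Int) × Int := ([[1, 1], [2, 1]], 2)
def Spec_region_bounds_py (regions : List (List Int)) (N : Int) (out : List (Int × Int × Int × Int × Int)) : Prop := out = region_bounds_py_alt regions N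
instance (regions : List (List Int)) (N : Int) (out : List (Int × Int × Int × Int × Int)) : Decidable (Spec_region_bounds_py regions N out) := by unfold Spec_region_bounds_py; infer_instance

-- ===== CLAIM (what is proved, stated in full; the proofs are below) =====
def Claim_equal_region_bounds_py : Prop := ∀ (regions : List (List Int)) (N : Int), Dom_region_bounds_py regions N → Pre_region_bounds_py regions N → Spec_region_bounds_py regions N (region_bounds_py regions N)

-- ===== LEMMAS AND PROOFS =====

-- A's per-cell box update.
def pvStepA (b : PySem.Dict Int (Int × Int × Int × Int)) (rid r c : Int) :
    PySem.Dict Int (Int × Int × Int × Int) :=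
  match b.get? rid with
  | none => b.insert rid (r, r, c, c)
  | some (r0, r1, c0, c1) => b.insert rid (min r0 r, max r1 r, min c0 c, max c1 c)

-- B's per-cell grouping update.
def pvStepB (g : PySem.Dict Int (List Int × List Int)) (rid r c : Int) :
    PySem.Dict Int (List Int × List Int) :=
  match g.get? rid with
  | none => g.insert rid ([r], [c])
  | some (rs, cs) => g.insert rid (rs ++ [r], cs ++ [c])

-- Reduce a coordinate group to its bounding box.
def pvReduce (v : List Int × List Int) : Int × Int × Int × Int :=
  ((PySem.List.min? v.1 (fun y => y)).getD 0,
   (PySem.List.max? v.1 (fun y => y)).getD 0,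
   (PySem.List.min? v.2 (fun y => y)).getD 0,
   (PySem.List.max? v.2 (fun y => y)).getD 0)

def pvRed (g : PySem.Dict Int (List Int × List Int)) : PySem.Dict Int (Int × Int × Int × Int) :=
  PySem.Dict.mk (g.items.map (fun p => (p.1, pvReduce p.2)))

lemma pvGet?_mk_map {V W : Type} (l : List (Int × V)) (f : V → W) (k : Int) :
    (PySem.Dict.mk (l.map (fun p => (p.1, f p.2)))).get? k = ((PySem.Dict.mk l).get? k).map f := by
  induction l with
  | nil => rfl
  | cons p t ih =>
      obtain ⟨a, v⟩ := p
      simp only [List.map_cons, PySem.Dict.get?_mk_cons]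
      by_cases h : (a == k) = true
      · simp [h]
      · simp [h, ih]

lemma pvContains_mk_map {V W : Type} (l : List (Int × V)) (f : V → W) (k : Int) :
    (PySem.Dict.mk (l.map (fun p => (p.1, f p.2)))).contains k = (PySem.Dict.mk l).contains k := by
  rw [PySem.Dict.contains_eq_isSome_get?, PySem.Dict.contains_eq_isSome_get?, pvGet?_mk_map]
  cases (PySem.Dict.mk l).get? k <;> rfl

lemma pvRed_insert (g : PySem.Dict Int (List Int × List Int)) (k : Int) (v : List Int × List Int) :
    pvRed (g.insert k v) = (pvRed g).insert k (pvReduce v) := by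
  have hc : (pvRed g).contains k = g.contains k := by
    have := pvContains_mk_map g.items pvReduce k
    simpa [pvRed] using this
  apply PySem.Dict.ext
  by_cases h : g.contains k = true
  · rw [show (pvRed (g.insert k v)).items
        = (g.insert k v).items.map (fun p => (p.1, pvReduce p.2)) from rfl,
      PySem.Dict.items_insert_of_contains g v h,
      PySem.Dict.items_insert_of_contains (pvRed g) (pvReduce v) (by rw [hc]; exact h)]
    show (g.items.map _).map _ = (g.items.map _).map _
    simp only [List.map_map]
    apply List.map_congr_left
    intro p _
    by_cases hk : p.1 = k <;> simp [hk]
  · have h' : g.contains k = false := by simpa using h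
    rw [show (pvRed (g.insert k v)).items
        = (g.insert k v).items.map (fun p => (p.1, pvReduce p.2)) from rfl,
      PySem.Dict.items_insert_of_not_contains g v h',
      PySem.Dict.items_insert_of_not_contains (pvRed g) (pvReduce v) (by rw [hc]; exact h')]
    simp [pvRed]

lemma pvMinI_append (rs : List Int) (r : Int) (h : rs ≠ []) :
    (PySem.List.min? (rs ++ [r]) (fun y => y)).getD 0
      = min ((PySem.List.min? rs (fun y => y)).getD 0) r := by
  obtain ⟨x, t, rfl⟩ := List.exists_cons_of_ne_nil h
  rw [List.cons_append, PySem.List.min?_id_cons, PySem.List.min?_id_cons]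
  simp [List.foldl_append]

lemma pvMaxI_append (rs : List Int) (r : Int) (h : rs ≠ []) :
    (PySem.List.max? (rs ++ [r]) (fun y => y)).getD 0
      = max ((PySem.List.max? rs (fun y => y)).getD 0) r := by
  obtain ⟨x, t, rfl⟩ := List.exists_cons_of_ne_nil h
  rw [List.cons_append, PySem.List.max?_id_cons, PySem.List.max?_id_cons]
  simp [List.foldl_append]

-- values stored by the grouping loop are nonempty coordinate lists
def pvInv (g : PySem.Dict Int (List Int × List Int)) : Prop :=
  ∀ p ∈ g.items, p.2.1 ≠ [] ∧ p.2.2 ≠ []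

lemma pvInv_stepB (g : PySem.Dict Int (List Int × List Int)) (rid r c : Int) (h : pvInv g) :
    pvInv (pvStepB g rid r c) := by
  unfold pvStepB
  cases hg : g.get? rid with
  | none =>
      intro p hp
      rcases (PySem.Dict.mem_items_insert g rid ([r], [c]) p).1 hp with rfl | ⟨hp', _⟩
      · exact ⟨by simp, by simp⟩
      · exact h p hp'
  | some v =>
      obtain ⟨rs, cs⟩ := v
      intro p hp
      rcases (PySem.Dict.mem_items_insert g rid (rs ++ [r], cs ++ [c]) p).1 hp with rfl | ⟨hp', _⟩
      · exact ⟨by simp, by simp⟩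
      · exact h p hp'

lemma pvStep_commute (g : PySem.Dict Int (List Int × List Int)) (rid r c : Int) (h : pvInv g) :
    pvStepA (pvRed g) rid r c = pvRed (pvStepB g rid r c) := by
  have hget : (pvRed g).get? rid = (g.get? rid).map pvReduce := by
    have := pvGet?_mk_map g.items pvReduce rid
    simpa [pvRed] using this
  unfold pvStepA pvStepB
  cases hg : g.get? rid with
  | none =>
      rw [hget, hg]
      show (pvRed g).insert rid (r, r, c, c) = pvRed (g.insert rid ([r], [c]))
      rw [pvRed_insert]
      rfl
  | some v =>
      obtain ⟨rs, cs⟩ := v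
      have hmem : (rid, (rs, cs)) ∈ g.items := PySem.Dict.mem_items_of_get?_eq_some g hg
      obtain ⟨hrs, hcs⟩ := h _ hmem
      rw [hget, hg]
      show (pvRed g).insert rid _ = pvRed (g.insert rid (rs ++ [r], cs ++ [c]))
      rw [pvRed_insert]
      congr 1
      simp only [pvReduce, pvMinI_append rs r hrs, pvMaxI_append rs r hrs,
        pvMinI_append cs c hcs, pvMaxI_append cs c hcs]

lemma pvFold_commute (cells : List (Int × Int)) (f : Int × Int → Int)
    (g : PySem.Dict Int (List Int × List Int)) (h : pvInv g) :
    cells.foldl (fun b p => pvStepA b (f p) p.1 p.2) (pvRed g)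
      = pvRed (cells.foldl (fun g p => pvStepB g (f p) p.1 p.2) g) := by
  induction cells generalizing g with
  | nil => rfl
  | cons p t ih =>
      simp only [List.foldl_cons]
      rw [pvStep_commute g (f p) p.1 p.2 h]
      exact ih _ (pvInv_stepB g (f p) p.1 p.2 h)

-- rewrite each port's nested loop as one fold over the flattened cell list
def pvCells (N : Int) : List (Int × Int) :=
  (PySem.List.pyRange 0 N 1).flatMap (fun r => (PySem.List.pyRange 0 N 1).map (fun c => (r, c)))

def pvRid (regions : List (List Int)) (p : Int × Int) : Int :=
  PySem.List.pyGetD (PySem.List.pyGetD regions p.1 []) p.2 0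

lemma pvA_eq (regions : List (List Int)) (N : Int) :
    region_bounds_py regions N
      = ((pvCells N).foldl (fun b p => pvStepA b (pvRid regions p) p.1 p.2)
          PySem.Dict.empty).items := by
  unfold region_bounds_py pvCells pvRid pvStepA
  rw [List.foldl_flatMap]
  simp only [List.foldl_map]

lemma pvB_eq (regions : List (List Int)) (N : Int) :
    region_bounds_py_alt regions N
      = (pvRed ((pvCells N).foldl (fun g p => pvStepB g (pvRid regions p) p.1 p.2)
          PySem.Dict.empty)).items := by
  unfold region_bounds_py_alt pvCells pvRid pvStepB pvRed pvReduce
  rw [List.foldl_flatMap]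
  simp only [List.foldl_map]

-- ===== VERDICT (by name: the statement is the Claim_ definition above) =====
theorem region_bounds_py_spec : Claim_equal_region_bounds_py := by
  intro regions N _ _
  show region_bounds_py regions N = region_bounds_py_alt regions N
  rw [pvA_eq, pvB_eq, ← pvFold_commute _ _ PySem.Dict.empty (by intro p hp; cases hp)]
  rfl
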